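-- pv_equiv track=rewrite | github.com/geventhttpclient/geventhttpclient | src/geventhttpclient/url.py | unquote_unreserved
-- ===== SOURCE A (Python) =====
-- class InvalidURL(Exception):
--     pass
--
-- UNRESERVED_SET = frozenset(
--     "ABCDEFGHIJKLMNOPQRSTUVWXYZabcdefghijklmnopqrstuvwxyz" + "0123456789-._~"
-- )
--
-- def unquote_unreserved(uri):
--     """Un-escape any percent-escape sequences in a URI that are unreserved
--     characters. This leaves all reserved, illegal and non-ASCII bytes encoded.
--
--     :rtype: str
--     """
--     parts = uri.split("%")
--     for i in range(1, len(parts)):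
--         h = parts[i][0:2]
--         if len(h) == 2 and h.isalnum():
--             try:
--                 c = chr(int(h, 16))
--             except ValueError:
--                 raise InvalidURL(f"Invalid percent-escape sequence: '{h}'")
--
--             if c in UNRESERVED_SET:
--                 parts[i] = c + parts[i][2:]
--             else:
--                 parts[i] = f"%{parts[i]}"
--         else:
--             parts[i] = f"%{parts[i]}"
--     return "".join(parts)
-- ===== SOURCE B (Python) =====
-- class InvalidURL(Exception):
--     pass
--
-- UNRESERVED_SET = frozenset(
--     "ABCDEFGHIJKLMNOPQRSTUVWXYZabcdefghijklmnopqrstuvwxyz" + "0123456789-._~"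
-- )
--
-- def unquote_unreserved(uri):
--     """Un-escape percent-escapes of unreserved characters by a single linear
--     scan over the string instead of split/join on '%'."""
--     out = []
--     i = 0
--     n = len(uri)
--     while i < n:
--         if uri[i] != "%":
--             out.append(uri[i])
--             i += 1
--             continue
--         h = uri[i + 1:i + 3]
--         if len(h) == 2 and h.isalnum():
--             try:
--                 c = chr(int(h, 16))
--             except ValueError:
--                 raise InvalidURL(f"Invalid percent-escape sequence: '{h}'")
--             if c in UNRESERVED_SET:
--                 out.append(c)
--             else:
--                 out.append("%" + h)
--             i += 3
--         else:
--             out.append("%")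
--             i += 1
--     return "".join(out)
-- ===== Notes on version B (the rewrite author's own statement) =====
-- stated objective: alternative
-- what changed: A splits the URI on '%', rewrites the head of every subsequent part and joins; B is a single linear scan over the characters that decodes each '%' with a two-character lookahead in place, never materialising the part list.
import Mathlib
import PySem

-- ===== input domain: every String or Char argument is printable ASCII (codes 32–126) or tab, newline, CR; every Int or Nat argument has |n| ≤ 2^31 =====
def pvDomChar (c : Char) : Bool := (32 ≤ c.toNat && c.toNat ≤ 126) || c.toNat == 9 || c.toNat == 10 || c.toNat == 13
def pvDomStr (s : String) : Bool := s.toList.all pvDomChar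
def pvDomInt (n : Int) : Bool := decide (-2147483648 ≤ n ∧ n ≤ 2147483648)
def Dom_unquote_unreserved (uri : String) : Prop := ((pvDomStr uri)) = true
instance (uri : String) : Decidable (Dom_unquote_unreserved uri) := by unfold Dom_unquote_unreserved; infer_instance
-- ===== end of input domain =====

-- B replaces A's split-on-'%' / per-part rewrite / join with a single linear scan of the
-- characters using a three-character lookahead at each '%' (objective: alternative decomposition).

-- ===== PORT A =====
def pvUNRESERVED : List Char :=
  ("ABCDEFGHIJKLMNOPQRSTUVWXYZabcdefghijklmnopqrstuvwxyz" ++ "0123456789-._~").toList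

-- body of A's loop for one part parts[i] (i ≥ 1); none = the InvalidURL raise
def pvFpart (p : List Char) : Option (List Char) :=
  if PySem.Chars.len (PySem.List.slice p (some 0) (some 2)) == 2
      && PySem.Chars.strIsalnum (PySem.List.slice p (some 0) (some 2)) then
    match PySem.Int.ofCharsBase? (PySem.List.slice p (some 0) (some 2)) 16 with
    | none => none                                   -- int(h, 16) raises ValueError → InvalidURL
    | some v =>
      if pvUNRESERVED.contains (Char.ofNat v.toNat) then
        some (Char.ofNat v.toNat :: PySem.List.slice p (some 2) none)
      else some ('%' :: p)
  else some ('%' :: p)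

-- the for-loop over parts[1:]; none propagates the raise
def pvGoA : List (List Char) → Option (List Char)
  | [] => some []
  | p :: ps =>
    match pvFpart p with
    | none => none
    | some q => (pvGoA ps).map (q ++ ·)

def unquote_unreserved (uri : String) : String :=
  match PySem.Str.split? uri "%" with
  | none => ""                                        -- unreachable: "%" ≠ ""
  | some [] => ""                                     -- unreachable: split is never empty
  | some (p0 :: ps) =>
    match pvGoA (ps.map String.toList) with
    | none => ""                                      -- A raises InvalidURL here (outside Pre_)
    | some t => String.ofList (p0.toList ++ t)        -- "".join(parts)

-- ===== PORT B =====
-- linear scan with index i, here structural recursion on the remaining characters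
def pvGoB : List Char → Option (List Char)
  | [] => some []
  | c :: rest =>
    if c = '%' then
      -- h := uri[i+1:i+3] = rest.take 2
      if (rest.take 2).length == 2 && PySem.Chars.strIsalnum (rest.take 2) then
        match PySem.Int.ofCharsBase? (rest.take 2) 16 with
        | none => none                                -- raise InvalidURL (outside Pre_)
        | some v =>
          if pvUNRESERVED.contains (Char.ofNat v.toNat) then
            (pvGoB (rest.drop 2)).map (Char.ofNat v.toNat :: ·)
          else (pvGoB (rest.drop 2)).map (fun t => '%' :: (rest.take 2 ++ t))
      else (pvGoB rest).map ('%' :: ·)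
    else (pvGoB rest).map (c :: ·)
termination_by cs => cs.length
decreasing_by all_goals (simp; try omega)

def unquote_unreserved_alt (uri : String) : String :=
  match pvGoB uri.toList with
  | none => ""
  | some l => String.ofList l                         -- "".join(out)

-- ===== PRECONDITION & SPEC =====
def pvIsHexDigit (c : Char) : Bool :=
  PySem.Chars.isdigit c || ('a' ≤ c && c ≤ 'f') || ('A' ≤ c && c ≤ 'F')

-- position i starts a percent-escape whose two following characters are alphanumeric
-- but not both hex digits: exactly there int(h, 16) fails and A raises InvalidURL
def pvBadEscAt (cs : List Char) (i : Nat) : Bool :=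
  match cs[i]?, cs[i+1]?, cs[i+2]? with
  | some c, some a, some b =>
    c == '%' && PySem.Chars.isalnum a && PySem.Chars.isalnum b
      && !(pvIsHexDigit a && pvIsHexDigit b)
  | _, _, _ => false

-- Pre_ excludes exactly the inputs on which A raises InvalidURL (B raises it there too)
def Pre_unquote_unreserved (uri : String) : Prop :=
  ∀ i < uri.toList.length, pvBadEscAt uri.toList i = false

instance (uri : String) : Decidable (Pre_unquote_unreserved uri) := by
  unfold Pre_unquote_unreserved; infer_instance

def pvWitness_unquote_unreserved : String := "a%20b%%x~%2F"

def Spec_unquote_unreserved (uri : String) (out : String) : Prop := out = unquote_unreserved_alt uri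
instance (uri : String) (out : String) : Decidable (Spec_unquote_unreserved uri out) := by unfold Spec_unquote_unreserved; infer_instance

-- ===== CLAIM (what is proved, stated in full; the proofs are below) =====
def Claim_equal_unquote_unreserved : Prop := ∀ (uri : String), Dom_unquote_unreserved uri → Pre_unquote_unreserved uri → Spec_unquote_unreserved uri (unquote_unreserved uri)

-- ===== LEMMAS AND PROOFS =====

-- steps of PySem.Chars.splitOn.go for sep = ['%']
theorem pvGo_nil (fuel : Nat) (cur : List Char) (acc : List (List Char)) :
    PySem.Chars.splitOn.go ['%'] fuel [] cur acc = (cur.reverse :: acc).reverse := by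
  cases fuel <;> simp [PySem.Chars.splitOn.go]

theorem pvGo_perc (fuel : Nat) (r : List Char) (cur : List Char) (acc : List (List Char)) :
    PySem.Chars.splitOn.go ['%'] (fuel+1) ('%'::r) cur acc
      = PySem.Chars.splitOn.go ['%'] fuel r [] (cur.reverse :: acc) := by
  simp [PySem.Chars.splitOn.go, List.isPrefixOf]

theorem pvGo_cons (fuel : Nat) (c : Char) (r : List Char) (hc : c ≠ '%')
    (cur : List Char) (acc : List (List Char)) :
    PySem.Chars.splitOn.go ['%'] (fuel+1) (c::r) cur acc
      = PySem.Chars.splitOn.go ['%'] fuel r (c::cur) acc := by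
  simp [PySem.Chars.splitOn.go, List.isPrefixOf, Ne.symm hc]

-- structural reformulation of split("%")
def pvMsplitP : List Char → List Char → List (List Char)
  | pre, [] => [pre]
  | pre, c :: r => if c = '%' then pre :: pvMsplitP [] r else pvMsplitP (pre ++ [c]) r

def pvMsplit (cs : List Char) : List (List Char) := pvMsplitP [] cs

theorem pvGo_msplit (fuel : Nat) : ∀ (l cur : List Char) (acc : List (List Char)),
    l.length ≤ fuel →
    PySem.Chars.splitOn.go ['%'] fuel l cur acc = acc.reverse ++ pvMsplitP cur.reverse l := by
  induction fuel with
  | zero =>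
    intro l cur acc hl
    interval_cases hl' : l.length
    · cases l with
      | nil => simp [pvGo_nil, pvMsplitP]
      | cons c r => simp at hl'
  | succ n ih =>
    intro l cur acc hl
    cases l with
    | nil => simp [pvGo_nil, pvMsplitP]
    | cons c r =>
      by_cases hc : c = '%'
      · subst hc
        rw [pvGo_perc, ih r [] _ (by simpa using Nat.lt_succ_iff.mp (by simpa using hl))]
        simp [pvMsplitP]
      · rw [pvGo_cons _ _ _ hc, ih r (c::cur) _ (by simpa using Nat.lt_succ_iff.mp (by simpa using hl))]
        simp [pvMsplitP, hc]

theorem pvSplitOn_eq_msplit (cs : List Char) :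
    PySem.Chars.splitOn cs ['%'] = pvMsplit cs := by
  unfold PySem.Chars.splitOn
  rw [pvGo_msplit (cs.length + 1) cs [] [] (by omega)]
  simp [pvMsplit]

theorem pvMsplitP_shift (l : List Char) : ∀ pre : List Char,
    pvMsplitP pre l = match pvMsplitP [] l with
      | [] => []
      | q :: qs => (pre ++ q) :: qs := by
  induction l with
  | nil => intro pre; simp [pvMsplitP]
  | cons c r ih =>
    intro pre
    by_cases hc : c = '%'
    · simp [pvMsplitP, hc]
    · simp only [pvMsplitP, if_neg hc, List.nil_append]
      rw [ih (pre ++ [c]), ih [c]]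
      cases pvMsplitP [] r with
      | nil => simp
      | cons q qs => simp

theorem pvMsplit_nil : pvMsplit [] = [[]] := rfl

theorem pvMsplit_perc (r : List Char) : pvMsplit ('%'::r) = [] :: pvMsplit r := by
  simp [pvMsplit, pvMsplitP]

theorem pvMsplit_cons (c : Char) (r : List Char) (hc : c ≠ '%') :
    pvMsplit (c::r) = (pvMsplit r).modifyHead (c :: ·) := by
  show pvMsplitP [] (c::r) = _
  simp only [pvMsplitP, if_neg hc, List.nil_append]
  rw [pvMsplitP_shift r [c]]
  unfold pvMsplit
  cases pvMsplitP [] r with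
  | nil => simp
  | cons q qs => simp

theorem pvMsplit_head (l : List Char) :
    ∃ qs, pvMsplit l = (l.takeWhile (· ≠ '%')) :: qs := by
  induction l with
  | nil => exact ⟨[], rfl⟩
  | cons c r ih =>
    by_cases hc : c = '%'
    · subst hc
      refine ⟨pvMsplit r, ?_⟩
      rw [pvMsplit_perc]
      simp [List.takeWhile]
    · obtain ⟨qs, hqs⟩ := ih
      refine ⟨qs, ?_⟩
      rw [pvMsplit_cons c r hc, hqs]
      simp [List.takeWhile, hc]

theorem pvAlnum_ne_perc {c : Char} (h : PySem.Chars.isalnum c = true) : c ≠ '%' := by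
  intro hc; subst hc; exact absurd h (by decide)

theorem pvStrIsalnum_perc_left (r : List Char) :
    PySem.Chars.strIsalnum ('%' :: r) = false := by
  simp [PySem.Chars.strIsalnum, (by decide : PySem.Chars.isalnum '%' = false)]

theorem pvStrIsalnum_perc_snd (a : Char) (r : List Char) :
    PySem.Chars.strIsalnum (a :: '%' :: r) = false := by
  simp [PySem.Chars.strIsalnum, (by decide : PySem.Chars.isalnum '%' = false)]

-- scan condition, shared shape of both ports' tests
def pvCond (h : List Char) : Bool := (h.length == 2) && PySem.Chars.strIsalnum h

theorem pvLenInt_beq (h : List Char) : (PySem.Chars.len h == 2) = (h.length == 2) := by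
  by_cases hl : h.length = 2
  · simp [PySem.Chars.len, hl]
  · have h1 : ¬ ((h.length : Int) = 2) := by exact_mod_cast hl
    simp [PySem.Chars.len, hl, h1]

-- A's per-part test/slices in plain take/drop form
theorem pvFpart_eq (p : List Char) :
    pvFpart p = (if pvCond (p.take 2) then
      match PySem.Int.ofCharsBase? (p.take 2) 16 with
      | none => none
      | some v =>
        if pvUNRESERVED.contains (Char.ofNat v.toNat) then
          some (Char.ofNat v.toNat :: p.drop 2)
        else some ('%' :: p)
    else some ('%' :: p)) := by
  have h02 : PySem.List.slice p (some 0) (some 2) = p.take 2 := by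
    simp [PySem.List.slice, PySem.List.clampIdx]
    try rfl
    try norm_num
  have h2n : PySem.List.slice p (some 2) none = p.drop 2 := by
    rw [PySem.List.slice_from p (by norm_num : (0:Int) ≤ 2)]
    try rfl
    try norm_num
  unfold pvFpart pvCond
  rw [h02, h2n, pvLenInt_beq]

-- the scan condition only sees the current part: takeWhile does not change it
theorem pvCond_takeWhile (r : List Char) :
    pvCond ((r.takeWhile (· ≠ '%')).take 2) = pvCond (r.take 2) := by
  cases r with
  | nil => rfl
  | cons a r' =>
    by_cases ha : a = '%'
    · subst ha
      cases r' with
      | nil => simp [List.takeWhile_cons, pvCond, pvStrIsalnum_perc_left]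
      | cons b r2 => simp [List.takeWhile_cons, pvCond, pvStrIsalnum_perc_left]
    · cases r' with
      | nil => simp [List.takeWhile_cons, ha]
      | cons b r2 =>
        by_cases hb : b = '%'
        · subst hb
          simp [List.takeWhile_cons, ha, pvCond, pvStrIsalnum_perc_snd]
        · simp [List.takeWhile_cons, ha, hb]

-- A's whole computation after the split, as a function of the raw characters
def pvFA (cs : List Char) : Option (List Char) :=
  match pvMsplit cs with
  | [] => some []
  | p0 :: ps => (pvGoA ps).map (p0 ++ ·)

theorem pvMain (n : Nat) : ∀ cs : List Char, cs.length ≤ n → pvGoB cs = pvFA cs := by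
  induction n with
  | zero =>
    intro cs hl
    have : cs = [] := List.eq_nil_of_length_eq_zero (Nat.le_zero.mp hl)
    subst this
    simp [pvGoB, pvFA, pvMsplit_nil, pvGoA]
  | succ n ih =>
    intro cs hl
    cases cs with
    | nil => simp [pvGoB, pvFA, pvMsplit_nil, pvGoA]
    | cons c rest =>
      by_cases hc : c = '%'
      · subst hc
        by_cases hcond : pvCond (rest.take 2) = true
        · -- the escape test fires: rest = a :: b :: r2 with a b alphanumeric
          cases rest with
          | nil => simp [pvCond] at hcond
          | cons a rest' =>
            cases rest' with
            | nil => simp [pvCond] at hcond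
            | cons b r2 =>
              have hc2 : (([a,b] : List Char).length == 2
                  && PySem.Chars.strIsalnum [a,b]) = true := by
                simpa [pvCond] using hcond
              have halnum : PySem.Chars.isalnum a = true ∧ PySem.Chars.isalnum b = true := by
                have := hc2
                simp [PySem.Chars.strIsalnum] at this
                exact this
              have ha := pvAlnum_ne_perc halnum.1
              have hb := pvAlnum_ne_perc halnum.2
              obtain ⟨qs2, hms⟩ := pvMsplit_head r2
              set t2 := r2.takeWhile (· ≠ '%') with ht2
              have hmr : pvMsplit (a :: b :: r2) = (a :: b :: t2) :: qs2 := by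
                rw [pvMsplit_cons a _ ha, pvMsplit_cons b _ hb, hms]
                rfl
              have hih : pvGoB r2 = (pvGoA qs2).map (t2 ++ ·) := by
                rw [ih r2 (by simp at hl; omega)]
                unfold pvFA
                rw [hms]
              have hcAB : pvCond [a, b] = true := by
                simpa [pvCond] using hc2
              have hfp : pvFpart (a :: b :: t2)
                  = (match PySem.Int.ofCharsBase? [a, b] 16 with
                     | none => none
                     | some v =>
                       if pvUNRESERVED.contains (Char.ofNat v.toNat) then
                         some (Char.ofNat v.toNat :: t2)
                       else some ('%' :: a :: b :: t2)) := by
                rw [pvFpart_eq]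
                simp only [List.take_succ_cons, List.take_zero, List.drop_succ_cons,
                  List.drop_zero]
                rw [if_pos hcAB]
              unfold pvFA
              rw [pvMsplit_perc, hmr]
              show pvGoB ('%' :: a :: b :: r2)
                = (match pvFpart (a :: b :: t2) with
                   | none => none
                   | some q => (pvGoA qs2).map (q ++ ·)).map (([] : List Char) ++ ·)
              rw [hfp]
              unfold pvGoB
              rw [if_pos rfl]
              simp only [List.take_succ_cons, List.take_zero, List.drop_succ_cons,
                List.drop_zero, hc2]
              first
              | rw [if_pos rfl]
              | simp only [if_true]
              | simp only [eq_self_iff_true, if_true]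
              cases hhex : PySem.Int.ofCharsBase? [a, b] 16 with
              | none => simp
              | some v =>
                rw [hih]
                by_cases hun : Char.ofNat v.toNat ∈ pvUNRESERVED
                · cases pvGoA qs2 <;> simp [hun]
                · cases pvGoA qs2 <;> simp [hun]
        · -- the test fails: emit '%' and move on one character
          obtain ⟨qs, hqs⟩ := pvMsplit_head rest
          have hihr : pvGoB rest = (pvGoA qs).map ((rest.takeWhile (· ≠ '%')) ++ ·) := by
            rw [ih rest (by simp at hl; omega)]
            unfold pvFA
            rw [hqs]
          have hcf : ((rest.take 2).length == 2
              && PySem.Chars.strIsalnum (rest.take 2)) = false := by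
            simpa [pvCond] using eq_false_of_ne_true hcond
          have hcA : pvCond ((rest.takeWhile (· ≠ '%')).take 2) = false := by
            rw [pvCond_takeWhile]
            simpa [pvCond] using hcf
          unfold pvFA
          rw [pvMsplit_perc, hqs]
          show pvGoB ('%' :: rest)
            = (match pvFpart (rest.takeWhile (· ≠ '%')) with
               | none => none
               | some q => (pvGoA qs).map (q ++ ·)).map (([] : List Char) ++ ·)
          unfold pvGoB
          rw [if_pos rfl]
          simp only [hcf, Bool.false_eq_true, if_false, pvFpart_eq, hcA]
          rw [hihr]
          cases pvGoA qs <;> simp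
      · -- ordinary character: copied by both
        obtain ⟨qs, hqs⟩ := pvMsplit_head rest
        have hihr : pvGoB rest = (pvGoA qs).map ((rest.takeWhile (· ≠ '%')) ++ ·) := by
          rw [ih rest (by simp at hl; omega)]
          unfold pvFA
          rw [hqs]
        unfold pvFA
        rw [pvMsplit_cons c rest hc, hqs]
        show pvGoB (c :: rest)
          = (pvGoA qs).map ((c :: rest.takeWhile (· ≠ '%')) ++ ·)
        unfold pvGoB
        rw [if_neg hc, hihr]
        cases pvGoA qs <;> simp

-- ===== VERDICT (by name: the statement is the Claim_ definition above) =====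
theorem unquote_unreserved_spec : Claim_equal_unquote_unreserved := by
  intro uri _ _
  unfold Spec_unquote_unreserved unquote_unreserved unquote_unreserved_alt
  have hsplit : PySem.Str.split? uri "%"
      = some ((pvMsplit uri.toList).map String.ofList) := by
    unfold PySem.Str.split?
    have : PySem.Chars.split? uri.toList "%".toList = some (pvMsplit uri.toList) := by
      unfold PySem.Chars.split?
      simp [pvSplitOn_eq_msplit]
    rw [this]
    rfl
  rw [hsplit]
  have hgb : pvGoB uri.toList = pvFA uri.toList := pvMain uri.toList.length _ (le_refl _)
  obtain ⟨qs, hqs⟩ := pvMsplit_head uri.toList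
  rw [hqs]
  rw [hgb]
  unfold pvFA
  rw [hqs]
  simp only [List.map_cons]
  have hmap : (qs.map String.ofList).map String.toList = qs := by
    simp [Function.comp_def]
  rw [hmap]
  cases pvGoA qs with
  | none => simp
  | some t => simp [String.toList_ofList]
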